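-- pv_equiv track=rewrite | github.com/wjq1015-hku/lecture-fragmentation | kpi/models/text_tiling.py | get_depths
-- ===== SOURCE A (Python) =====
-- def get_depths(sim):
--     depths = [0 for _ in sim]
--
--     for idx in range(1, len(sim) - 1):
--         lpeak = sim[idx]
--         for score in sim[idx::-1]:
--             if score >= lpeak:
--                 lpeak = score
--             else:
--                 break
--         rpeak = sim[idx]
--         for score in sim[idx:]:
--             if score >= rpeak:
--                 rpeak = score
--             else:
--                 break
--         depths[idx] = lpeak + rpeak - 2 * sim[idx]
--     return depths
-- ===== SOURCE B (Python) =====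
-- def _peaks(sim):
--     # peaks[i] = the value at the start of the maximal non-increasing run ending at i
--     out = []
--     peak = None
--     prev = None
--     for x in sim:
--         if prev is None or prev < x:
--             peak = x
--         out.append(peak)
--         prev = x
--     return out
--
--
-- def get_depths(sim):
--     n = len(sim)
--     lp = _peaks(sim)
--     rp = _peaks(sim[::-1])[::-1]
--     return [0 if i == 0 or i == n - 1 else lp[i] + rp[i] - 2 * x
--             for i, x in enumerate(sim)]
-- ===== Notes on version B (the rewrite author's own statement) =====
-- stated objective: faster
-- what changed: A rescans left and right from every index (worst-case quadratic); B computes all left- and right-run peaks in two linear monotone-run passes (the right pass is the left pass on the reversed list) and then builds the output in one comprehension.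
import Mathlib
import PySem

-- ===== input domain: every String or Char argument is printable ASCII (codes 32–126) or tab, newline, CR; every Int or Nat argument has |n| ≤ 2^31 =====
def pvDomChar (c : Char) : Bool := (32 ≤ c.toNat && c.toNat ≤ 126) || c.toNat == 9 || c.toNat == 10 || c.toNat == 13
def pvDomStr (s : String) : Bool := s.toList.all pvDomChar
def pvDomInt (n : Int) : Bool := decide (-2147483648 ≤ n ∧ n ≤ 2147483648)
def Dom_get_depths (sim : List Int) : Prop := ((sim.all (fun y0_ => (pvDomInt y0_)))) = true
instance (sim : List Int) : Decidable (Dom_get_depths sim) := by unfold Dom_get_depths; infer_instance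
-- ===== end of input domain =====

-- B replaces A's per-index backward/forward rescans by two linear monotone-run passes (asymptotic speed-up); same return value.

-- ===== PORT A =====
-- inner 'for score in …: if score >= peak: peak = score else: break' loop of A
def pvWalk (peak : Int) : List Int → Int
  | [] => peak
  | s :: rest => if s ≥ peak then pvWalk s rest else peak

-- body of A's 'for idx in range(1, len(sim)-1)' loop (idx is always a valid index there)
def pvStepA (sim : List Int) (depths : List Int) (idx : Int) : List Int :=
  let s := PySem.List.pyGetD sim idx 0                                        -- sim[idx]
  let lpeak := pvWalk s ((PySem.List.slice? sim (some idx) none (-1)).getD [])  -- sim[idx::-1] (step ≠ 0, never none)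
  let rpeak := pvWalk s (PySem.List.slice sim (some idx) none)                  -- sim[idx:]
  depths.set idx.toNat (lpeak + rpeak - 2 * s)

def get_depths (sim : List Int) : List Int :=
  let depths := sim.map (fun _ => (0 : Int))
  (PySem.List.pyRange 1 ((sim.length : Int) - 1) 1).foldl (pvStepA sim) depths

-- ===== PORT B =====
-- B's _peaks: carried state (prev, peak); 'prev is None' is the first iteration, i.e. the head case of pvPeaks
def pvPeaksAux (prev peak : Int) : List Int → List Int
  | [] => []
  | x :: xs => let p := if prev < x then x else peak
               p :: pvPeaksAux x p xs

def pvPeaks : List Int → List Int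
  | [] => []
  | x :: xs => x :: pvPeaksAux x x xs

def get_depths_alt (sim : List Int) : List Int :=
  let n := sim.length
  let lp := pvPeaks sim
  let rp := (pvPeaks sim.reverse).reverse
  (PySem.List.enumerate sim).map (fun p =>
    if p.1 = 0 ∨ p.1 = (n : Int) - 1 then 0
    else PySem.List.pyGetD lp p.1 0 + PySem.List.pyGetD rp p.1 0 - 2 * p.2)

-- ===== PRECONDITION & SPEC =====
def Spec_get_depths (sim : List Int) (out : List Int) : Prop := out = get_depths_alt sim
instance (sim : List Int) (out : List Int) : Decidable (Spec_get_depths sim out) := by unfold Spec_get_depths; infer_instance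

-- ===== CLAIM (what is proved, stated in full; the proofs are below) =====
def Claim_equal_get_depths : Prop := ∀ (sim : List Int), Dom_get_depths sim → Spec_get_depths sim (get_depths sim)

-- ===== LEMMAS AND PROOFS =====

theorem pvPeaksAux_length (prev peak : Int) (xs : List Int) :
    (pvPeaksAux prev peak xs).length = xs.length := by
  induction xs generalizing prev peak with
  | nil => rfl
  | cons x xs ih => simp [pvPeaksAux, ih]

theorem pvPeaks_length (l : List Int) : (pvPeaks l).length = l.length := by
  cases l with
  | nil => rfl
  | cons x xs => simp [pvPeaks, pvPeaksAux_length]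

theorem filterMap_eq_map_of {α β : Type} (f : α → Option β) (g : α → β) (l : List α)
    (h : ∀ a ∈ l, f a = some (g a)) : l.filterMap f = l.map g := by
  induction l with
  | nil => rfl
  | cons a l ih =>
      simp [h a (by simp), ih (fun b hb => h b (by simp [hb]))]

-- sim[idx::-1] for a valid nonnegative index is the reversed prefix
theorem slice?_from_neg_one (xs : List Int) (i : Nat) (h : i < xs.length) :
    PySem.List.slice? xs (some (i : Int)) none (-1) = some ((xs.take (i+1)).reverse) := by
  unfold PySem.List.slice? PySem.List.sliceIndices
  simp
  have hmin : (if (i:Int) < 0 then max ((i:Int) + ↑xs.length) (-1) else min (↑i) (↑xs.length - 1)) = (i:Int) := by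
    rw [if_neg (by omega)]; omega
  rw [hmin, if_pos (by omega)]
  have hn : ((i:Int) + 1).toNat = i + 1 := by omega
  rw [hn]
  rw [filterMap_eq_map_of _ (fun k => xs.getD (i - k) 0) _ ?_]
  · apply List.ext_getElem
    · simp [h]
    · intro k h1 h2
      simp only [List.getElem_map, List.getElem_range, List.getElem_reverse]
      simp at h1
      rw [List.getD_eq_getElem _ _ (by omega), List.getElem_take]
      congr 1
      simp [List.length_take] at h2 ⊢
      omega
  · intro k hk
    simp at hk
    rw [show ((i:Int) + -(k:Int)).toNat = i - k by omega]
    beta_reduce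
    rw [List.getElem?_eq_getElem (by omega), List.getD_eq_getElem _ _ (by omega)]

-- the walk helper computed as '(if prev < x then x else walk of history)' IS a walk
theorem pvWalk_step (pre : List Int) (prev x : Int) :
    pvWalk x (prev :: pre) = if prev < x then x else pvWalk prev pre := by
  by_cases hc : prev < x
  · simp [pvWalk, hc, not_le.mpr hc]
  · simp [pvWalk, hc, not_lt.mp hc]

theorem pvPeaksAux_getD (xs : List Int) (pre : List Int) (prev : Int) (i : Nat)
    (h : i < xs.length) :
    (pvPeaksAux prev (pvWalk prev pre) xs).getD i 0
      = pvWalk (xs.getD i 0) ((xs.take (i+1)).reverse ++ prev :: pre) := by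
  induction xs generalizing pre prev i with
  | nil => simp at h
  | cons x xs ih =>
      cases i with
      | zero =>
          simp only [pvPeaksAux, List.getD_cons_zero, List.take_succ_cons, List.take_zero,
            List.reverse_cons, List.reverse_nil, List.nil_append, List.cons_append]
          rw [show pvWalk x (x :: prev :: pre) = pvWalk x (prev :: pre) by simp [pvWalk]]
          rw [pvWalk_step]
      | succ i =>
          have hp : (if prev < x then x else pvWalk prev pre) = pvWalk x (prev :: pre) :=
            (pvWalk_step pre prev x).symm
          simp only [pvPeaksAux, List.getD_cons_succ, hp]
          rw [ih (prev :: pre) x i (by simpa using h)]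
          simp [List.take_succ_cons]

theorem pvPeaks_getD (l : List Int) (i : Nat) (h : i < l.length) :
    (pvPeaks l).getD i 0 = pvWalk (l.getD i 0) ((l.take (i+1)).reverse) := by
  cases l with
  | nil => simp at h
  | cons x xs =>
      cases i with
      | zero => simp [pvPeaks, pvWalk]
      | succ i =>
          have h2 := pvPeaksAux_getD xs [] x i (by simpa using h)
          simp only [show pvWalk x [] = x from rfl] at h2
          simp only [pvPeaks, List.getD_cons_succ]
          rw [h2]
          simp [List.take_succ_cons]

theorem pvPeaks_rev_getD (l : List Int) (i : Nat) (h : i < l.length) :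
    ((pvPeaks l.reverse).reverse).getD i 0 = pvWalk (l.getD i 0) (l.drop i) := by
  have hlen : (pvPeaks l.reverse).length = l.length := by simp [pvPeaks_length]
  have hi : i < (pvPeaks l.reverse).reverse.length := by simpa [hlen] using h
  rw [List.getD_eq_getElem _ _ hi, List.getElem_reverse]
  have hj : l.length - 1 - i < l.reverse.length := by simp; omega
  rw [← List.getD_eq_getElem _ 0]
  rw [show (pvPeaks l.reverse).length - 1 - i = l.length - 1 - i by simp [hlen]]
  rw [pvPeaks_getD l.reverse (l.length - 1 - i) (by simpa using hj)]
  congr 1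
  · rw [List.getD_eq_getElem _ _ hj, List.getElem_reverse, List.getD_eq_getElem _ _ (by omega)]
    congr 1
    omega
  · rw [show l.length - 1 - i + 1 = l.length - i by omega, List.take_reverse]
    rw [show l.length - (l.length - i) = i by omega, List.reverse_reverse]

-- the per-index value A writes at a (valid, nonnegative) index
def pvFA (sim : List Int) (i : Nat) : Int :=
  pvWalk (sim.getD i 0) ((sim.take (i+1)).reverse)
    + pvWalk (sim.getD i 0) (sim.drop i) - 2 * sim.getD i 0

theorem pvStepA_eq (sim d : List Int) (i : Nat) (h : i < sim.length) :
    pvStepA sim d (i : Int) = d.set i (pvFA sim i) := by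
  unfold pvStepA
  rw [slice?_from_neg_one sim i h]
  simp [PySem.List.pyGetD_natCast, PySem.List.slice_from_natCast, pvFA]

theorem foldA_length (sim d : List Int) (r : List Int) :
    ((r.foldl (pvStepA sim) d)).length = d.length := by
  induction r generalizing d with
  | nil => rfl
  | cons a r ih => simp [List.foldl_cons, ih, pvStepA]

theorem foldA_getD (sim : List Int) (m : Nat) (hm : m ≤ sim.length) (i : Nat) :
    ((PySem.List.pyRange 1 (m : Int) 1).foldl (pvStepA sim) (sim.map (fun _ => (0:Int)))).getD i 0
      = if 1 ≤ i ∧ i < m then pvFA sim i else 0 := by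
  induction m with
  | zero =>
      rw [PySem.List.pyRange_one_eq_nil (by omega)]
      simp [List.getD]
  | succ m ih =>
      by_cases hm0 : m = 0
      · subst hm0
        rw [show ((1 : Nat) : Int) = 1 by norm_num, PySem.List.pyRange_one_eq_nil (by omega)]
        simp [List.getD]
        intro h1 h2
        omega
      · have hm1 : (1 : Int) ≤ (m : Int) := by omega
        rw [show ((m + 1 : Nat) : Int) = (m : Int) + 1 by push_cast; ring]
        rw [PySem.List.pyRange_one_succ_right hm1, List.foldl_append, List.foldl_cons, List.foldl_nil]
        rw [pvStepA_eq sim _ m (by omega)]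
        have hlen : ((PySem.List.pyRange 1 (m : Int) 1).foldl (pvStepA sim)
            (sim.map (fun _ => (0:Int)))).length = sim.length := by
          rw [foldA_length]; simp
        by_cases hi : i = m
        · subst hi
          rw [List.getD, List.getElem?_set, if_pos rfl, if_pos (by omega)]
          simp
          omega
        · rw [List.getD, List.getElem?_set, if_neg (fun hh => hi hh.symm)]
          rw [← List.getD]
          rw [ih (by omega)]
          by_cases hcond : 1 ≤ i ∧ i < m
          · rw [if_pos hcond, if_pos ⟨hcond.1, by omega⟩]
          · rw [if_neg hcond, if_neg (by omega)]

theorem lenA (sim : List Int) : (get_depths sim).length = sim.length := by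
  unfold get_depths
  rw [foldA_length]
  simp

theorem lenB (sim : List Int) : (get_depths_alt sim).length = sim.length := by
  unfold get_depths_alt
  simp [PySem.List.length_enumerate]

theorem get_depths_eq_alt (sim : List Int) : get_depths sim = get_depths_alt sim := by
  apply List.ext_getElem
  · rw [lenA, lenB]
  · intro i h1 h2
    have hn : i < sim.length := by rwa [lenA] at h1
    have hone : 1 ≤ sim.length := by omega
    -- A side
    rw [← List.getD_eq_getElem _ 0 h1, ← List.getD_eq_getElem _ 0 h2]
    unfold get_depths
    rw [show ((sim.length : Int) - 1) = ((sim.length - 1 : Nat) : Int) by omega]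
    rw [foldA_getD sim (sim.length - 1) (by omega) i]
    -- B side
    unfold get_depths_alt
    have hi' : i < (PySem.List.enumerate sim).length := by
      simpa [PySem.List.length_enumerate] using hn
    rw [List.getD_eq_getElem _ 0 (by simpa using hi'), List.getElem_map,
      PySem.List.getElem_enumerate]
    simp only [zero_add]
    by_cases hedge : i = 0 ∨ i = sim.length - 1
    · rw [if_neg (by omega), if_pos (by omega)]
    · rw [not_or] at hedge
      rw [if_pos ⟨by omega, by omega⟩, if_neg (by omega)]
      rw [PySem.List.pyGetD_natCast, PySem.List.pyGetD_natCast]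
      unfold pvFA
      rw [pvPeaks_getD sim i hn, pvPeaks_rev_getD sim i hn]
      rw [List.getD_eq_getElem _ 0 hn]

-- ===== VERDICT (by name: the statement is the Claim_ definition above) =====
theorem get_depths_spec : Claim_equal_get_depths := by
  intro sim _
  unfold Spec_get_depths
  exact get_depths_eq_alt sim
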